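-- pv_equiv track=rewrite | github.com/aziele/genome-dereplicator | gender.py | update_clusters
-- ===== SOURCE A (Python) =====
-- def update_clusters(curr: dict[str, set[str]], prev: dict[str, set[str]]):
--     """Updates current clusters based on clusters from previous dereplication.
--
--     The function is used in dereplication running on random batches of genomes.
--     In this case, the function updates clusters from a current batch with
--     clusters from the previous batch. Thus, the function mutates one of its
--     arguments (`curr`). In the case of dereplication occurring on all genomes,
--     the function has no side effect on any of its arguments.
--
--     Args:
--         curr:
--             Current cluster.
--         prev:
--             Previous cluster.
--
--     Returns:
--         A dict mapping representative genomes to the corresponding cluster.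
--         Each cluster is represented as a set of genome names.
--     """
--     if not prev: return curr
--     for repr_genome in curr:
--         for name in list(curr[repr_genome]):
--             if name in prev:
--                 curr[repr_genome].update(prev[name])
--                 del prev[name]
--     for repr_genome in prev:
--         if repr_genome not in curr:
--             curr[repr_genome] = set()
--         curr[repr_genome].update(prev[repr_genome])
--     return curr
-- ===== SOURCE B (Python) =====
-- def update_clusters(curr: dict[str, set[str]], prev: dict[str, set[str]]):
--     """Pure rebuild, same return value as A (A mutates curr/prev in place; B
--     mutates neither — the equivalence is about the return value). One pass over
--     curr threads a `seen` set of already-claimed member names (first cluster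
--     wins) and builds a fresh output dict; a second guarded pass folds the
--     unclaimed prev entries in."""
--     seen = set()
--     merged = {}
--     for rep, members in curr.items():
--         cluster = set(members)
--         for name in members:
--             if name not in seen:
--                 seen.add(name)
--                 if name in prev:
--                     cluster.update(prev[name])
--         merged[rep] = cluster
--     for key, val in prev.items():
--         if key not in seen:
--             if key in merged:
--                 merged[key].update(val)
--             else:
--                 merged[key] = set(val)
--     return merged
-- ===== Notes on version B (the rewrite author's own statement) =====
-- stated objective: alternative
-- what changed: A merges in place, threading the mutated (curr, prev) dict pair through nested scans with deletions from prev; B is a pure rebuild: one pass over curr threads a 'seen' set of already-claimed member names and builds a fresh output dict, then one guarded pass over prev folds the unclaimed entries in, with no mutation and no deletions.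
import Mathlib
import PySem

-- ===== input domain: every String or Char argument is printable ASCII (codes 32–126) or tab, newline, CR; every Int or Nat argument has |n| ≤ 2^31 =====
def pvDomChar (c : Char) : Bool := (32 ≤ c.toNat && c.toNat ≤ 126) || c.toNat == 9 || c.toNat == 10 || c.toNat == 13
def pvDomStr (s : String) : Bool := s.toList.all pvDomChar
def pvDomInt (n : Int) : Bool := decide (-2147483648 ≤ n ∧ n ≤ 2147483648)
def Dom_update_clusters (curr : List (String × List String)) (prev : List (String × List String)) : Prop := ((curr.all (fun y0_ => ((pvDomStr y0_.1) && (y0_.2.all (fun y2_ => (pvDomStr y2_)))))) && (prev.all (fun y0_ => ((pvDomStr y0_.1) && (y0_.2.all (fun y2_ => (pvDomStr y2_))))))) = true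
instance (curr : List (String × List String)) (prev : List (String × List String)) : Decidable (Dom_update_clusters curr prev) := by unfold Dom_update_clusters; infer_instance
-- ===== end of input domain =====

-- A merges clusters IN PLACE, threading the mutated (curr, prev) dict pair and deleting
-- consumed keys from prev; B is a pure rebuild (objective: alternative): one pass over curr
-- threads a `seen` set of already-claimed member names and builds a fresh output dict, then
-- one guarded pass over prev folds the unclaimed entries in.  B mutates neither argument;
-- the theorems below are about the RETURN value only.

-- ===== PORT A =====
-- state: (curr, prev) as Python dicts
def ucAStep (r : String)
    (st : PySem.Dict String (List String) × PySem.Dict String (List String)) (name : String) :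
    PySem.Dict String (List String) × PySem.Dict String (List String) :=
  if st.2.contains name then
    (st.1.modify r [] (fun s => PySem.Set.update s (st.2.getD name [])), st.2.erase name)
  else st

def update_clusters (curr : List (String × List String)) (prev : List (String × List String)) :
    List (String × List String) :=
  let c : PySem.Dict String (List String) := PySem.Dict.mk curr
  let p : PySem.Dict String (List String) := PySem.Dict.mk prev
  if p.items.isEmpty then c.items else
  let st := c.keys.foldl (fun st r => (st.1.getD r []).foldl (ucAStep r) st) (c, p)
  (st.2.keys.foldl (fun c r =>
      (if c.contains r then c else c.insert r PySem.Set.empty).modify r []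
        (fun s => PySem.Set.update s (st.2.getD r []))) st.1).items

-- ===== PORT B =====
-- cluster = set(members); for name in members: if name not in seen: seen.add(name); if name in prev: cluster.update(prev[name])
def ucClusterMerge (p : PySem.Dict String (List String)) (members : List String)
    (seen : PySem.Set String) : PySem.Set String × PySem.Set String :=
  members.foldl (fun acc name =>
      if acc.2.contains name then acc
      else if p.contains name then
        (PySem.Set.update acc.1 (p.getD name []), PySem.Set.add acc.2 name)
      else (acc.1, PySem.Set.add acc.2 name))
    (PySem.Set.ofList members, seen)

def update_clusters_alt (curr : List (String × List String)) (prev : List (String × List String)) :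
    List (String × List String) :=
  let p : PySem.Dict String (List String) := PySem.Dict.mk prev
  let built := curr.foldl (fun (acc : PySem.Dict String (List String) × PySem.Set String) pr =>
      let res := ucClusterMerge p pr.2 acc.2
      (acc.1.insert pr.1 res.1, res.2))
    (PySem.Dict.empty, PySem.Set.empty)
  (p.items.foldl (fun m pr =>
      if built.2.contains pr.1 then m
      else if m.contains pr.1 then m.modify pr.1 [] (fun s => PySem.Set.update s pr.2)
      else m.insert pr.1 (PySem.Set.ofList pr.2)) built.1).items

-- ===== PRECONDITION & SPEC =====
-- Pre_ only requires the association lists' keys to be unique and curr's value lists to have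
-- distinct elements: they model Python dicts and sets, which cannot carry a duplicate key or
-- a duplicate element, so no genuine input of A is excluded (A is total on dict-of-set inputs).
def Pre_update_clusters (curr : List (String × List String)) (prev : List (String × List String)) : Prop :=
  (curr.map Prod.fst).Nodup ∧ (prev.map Prod.fst).Nodup ∧ ∀ pr ∈ curr, pr.2.Nodup
instance (curr : List (String × List String)) (prev : List (String × List String)) :
    Decidable (Pre_update_clusters curr prev) := by unfold Pre_update_clusters; infer_instance

def pvWitness_update_clusters : (List (String × List String)) × (List (String × List String)) :=
  ([("r1", ["a", "b"]), ("r2", ["c"])], [("a", ["x", "y"]), ("d", ["z"])])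

def Spec_update_clusters (curr : List (String × List String)) (prev : List (String × List String))
    (out : List (String × List String)) : Prop := out = update_clusters_alt curr prev
instance (curr : List (String × List String)) (prev : List (String × List String))
    (out : List (String × List String)) : Decidable (Spec_update_clusters curr prev out) := by
  unfold Spec_update_clusters; infer_instance

-- ===== CLAIM (what is proved, stated in full; the proofs are below) =====
def Claim_equal_update_clusters : Prop :=
  ∀ (curr : List (String × List String)) (prev : List (String × List String)),
    Dom_update_clusters curr prev → Pre_update_clusters curr prev →
      Spec_update_clusters curr prev (update_clusters curr prev)

-- ===== LEMMAS AND PROOFS =====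

-- the live prev dict after the names in `seen` have been consumed
def ucRest (prev : List (String × List String)) (seen : PySem.Set String) :
    PySem.Dict String (List String) :=
  PySem.Dict.mk (prev.filter (fun pr => !seen.contains pr.1))

def ucProcess (p : PySem.Dict String (List String)) :
    List (String × List String) → PySem.Set String →
      List (String × List String) × PySem.Set String
  | [], seen => ([], seen)
  | pr :: rest, seen =>
      let res := ucClusterMerge p pr.2 seen
      let tail := ucProcess p rest res.2
      ((pr.1, res.1) :: tail.1, tail.2)

theorem uc_mem_iff (s : PySem.Set String) (x : String) : s.contains x = true ↔ x ∈ s := by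
  simp [PySem.Set.contains_eq_listContains, List.contains_eq_mem]

theorem uc_contains_add (s : PySem.Set String) (y x : String) :
    (PySem.Set.add s y).contains x = (s.contains x || x == y) := by
  simp [PySem.Set.contains_eq_listContains, List.contains_eq_mem, PySem.Set.mem_add,
    Bool.decide_or, beq_eq_decide]

theorem uc_contains_rest (prev : List (String × List String)) (seen : PySem.Set String)
    (n : String) :
    (ucRest prev seen).contains n
      = ((PySem.Dict.mk prev).contains n && !seen.contains n) := by
  simp only [ucRest, PySem.Dict.contains, PySem.Dict.items, List.any_filter]
  rw [Bool.eq_iff_iff]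
  simp only [Bool.and_eq_true, List.any_eq_true, Bool.not_eq_true', beq_iff_eq]
  constructor
  · rintro ⟨p, hp, hsp, rfl⟩; exact ⟨⟨p, hp, rfl⟩, hsp⟩
  · rintro ⟨⟨p, hp, rfl⟩, hs⟩; exact ⟨p, hp, hs, rfl⟩

theorem uc_getD_rest (prev : List (String × List String)) (seen : PySem.Set String)
    (n : String) (h : seen.contains n = false) :
    (ucRest prev seen).getD n [] = (PySem.Dict.mk prev).getD n [] := by
  simp only [ucRest, PySem.Dict.getD, PySem.Dict.get?, PySem.Dict.items]
  congr 2
  induction prev with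
  | nil => rfl
  | cons q rest ih =>
    by_cases hq : q.1 = n
    · rw [List.filter_cons, if_pos (by rw [hq, h]; rfl),
        List.find?_cons_of_pos (by simp [hq]), List.find?_cons_of_pos (by simp [hq])]
    · by_cases hs : seen.contains q.1 = true
      · rw [List.filter_cons, if_neg (by simp; exact (uc_mem_iff _ _).mp hs), List.find?_cons_of_neg (by simp [hq]), ih]
      · rw [List.filter_cons, if_pos (by simp only [Bool.not_eq_true] at hs; rw [hs]; rfl), List.find?_cons_of_neg (by simp [hq]),
          List.find?_cons_of_neg (by simp [hq]), ih]

theorem uc_erase_rest (prev : List (String × List String)) (seen : PySem.Set String)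
    (n : String) :
    (ucRest prev seen).erase n = ucRest prev (PySem.Set.add seen n) := by
  simp only [ucRest, PySem.Dict.erase, PySem.Dict.items, List.filter_filter]
  congr 1
  apply List.filter_congr
  intro p _
  rw [uc_contains_add]
  by_cases h2 : seen.contains p.1 = true
  · rw [h2]; by_cases h1 : p.1 = n <;> simp [h1]
  · rw [Bool.not_eq_true] at h2; rw [h2]; by_cases h1 : p.1 = n <;> simp [h1]

theorem uc_rest_add_of_absent (prev : List (String × List String)) (seen : PySem.Set String)
    (n : String) (h : (PySem.Dict.mk prev).contains n = false) :
    ucRest prev (PySem.Set.add seen n) = ucRest prev seen := by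
  simp only [ucRest]
  congr 1
  apply List.filter_congr
  intro p hp
  have hne : p.1 ≠ n := by
    intro he
    simp only [PySem.Dict.contains, PySem.Dict.items, List.any_eq_false] at h
    have := h p hp
    simp [he] at this
  rw [uc_contains_add]
  simp [hne]

theorem uc_modify_mid (done rest : List (String × List String)) (r : String)
    (s : List String) (f : List String → List String)
    (hd : r ∉ done.map Prod.fst) (hr : r ∉ rest.map Prod.fst) :
    (PySem.Dict.mk (done ++ (r, s) :: rest)).modify r [] f
      = PySem.Dict.mk (done ++ (r, f s) :: rest) := by
  have hdone : ∀ p ∈ done, ¬(p.1 == r) = true := by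
    intro p hp hb
    have hpr : p.1 = r := by simpa using hb
    exact hd (hpr ▸ List.mem_map_of_mem hp)
  have hfind : List.find? (fun p => p.1 == r) (done ++ (r, s) :: rest) = some (r, s) := by
    rw [List.find?_append, List.find?_eq_none.mpr hdone]
    simp [List.find?_cons_of_pos]
  have hcont : (PySem.Dict.mk (done ++ (r, s) :: rest)).contains r = true := by
    simp [PySem.Dict.contains]
  have hget : (PySem.Dict.mk (done ++ (r, s) :: rest)).getD r [] = s := by
    simp [PySem.Dict.getD, PySem.Dict.get?, hfind]
  rw [PySem.Dict.modify, hget, PySem.Dict.insert, if_pos hcont]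
  congr 1
  simp only [PySem.Dict.items, List.map_append, List.map_cons]
  have hrest : ∀ p ∈ rest, ¬(p.1 == r) = true := by
    intro p hp hb
    have hpr : p.1 = r := by simpa using hb
    exact hr (hpr ▸ List.mem_map_of_mem hp)
  rw [List.map_congr_left (fun p hp => if_neg (hdone p hp)),
    List.map_congr_left (fun p hp => if_neg (hrest p hp))]
  simp

theorem uc_ofList_nodup (ms : List String) (h : ms.Nodup) :
    (PySem.Set.ofList ms : PySem.Set String) = ms := by
  rw [← PySem.Set.update_nil_left, PySem.Set.update_eq_append_of_disjoint _ _ h (by simp)]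
  simp

theorem uc_inner (prev : List (String × List String)) (r : String) :
    ∀ (ms : List String) (done rest : List (String × List String))
      (s : List String) (seen : PySem.Set String),
      r ∉ done.map Prod.fst → r ∉ rest.map Prod.fst →
      ms.foldl (ucAStep r) (PySem.Dict.mk (done ++ (r, s) :: rest), ucRest prev seen)
        = (PySem.Dict.mk (done ++
             (r, (ms.foldl (fun acc name =>
                    if acc.2.contains name then acc
                    else if (PySem.Dict.mk prev).contains name then
                      (PySem.Set.update acc.1 ((PySem.Dict.mk prev).getD name []),
                       PySem.Set.add acc.2 name)
                    else (acc.1, PySem.Set.add acc.2 name)) (s, seen)).1) :: rest),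
           ucRest prev (ms.foldl (fun acc name =>
                    if acc.2.contains name then acc
                    else if (PySem.Dict.mk prev).contains name then
                      (PySem.Set.update acc.1 ((PySem.Dict.mk prev).getD name []),
                       PySem.Set.add acc.2 name)
                    else (acc.1, PySem.Set.add acc.2 name)) (s, seen)).2) := by
  intro ms
  induction ms with
  | nil => intro done rest s seen _ _; rfl
  | cons m ms ih =>
    intro done rest s seen hd hr
    simp only [List.foldl_cons]
    by_cases hseen : seen.contains m = true
    · have hc : (ucRest prev seen).contains m = false := by
        rw [uc_contains_rest, hseen]; simp
      have hA : ucAStep r (PySem.Dict.mk (done ++ (r, s) :: rest), ucRest prev seen) m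
          = (PySem.Dict.mk (done ++ (r, s) :: rest), ucRest prev seen) := by
        simp [ucAStep, hc]
      rw [hA, if_pos hseen]
      exact ih done rest s seen hd hr
    · rw [Bool.not_eq_true] at hseen
      by_cases hp : (PySem.Dict.mk prev : PySem.Dict String (List String)).contains m = true
      · have hc : (ucRest prev seen).contains m = true := by
          rw [uc_contains_rest, hseen, hp]; rfl
        have hA : ucAStep r (PySem.Dict.mk (done ++ (r, s) :: rest), ucRest prev seen) m
            = (PySem.Dict.mk (done ++
                 (r, PySem.Set.update s ((PySem.Dict.mk prev).getD m [])) :: rest),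
               ucRest prev (PySem.Set.add seen m)) := by
          simp only [ucAStep, hc, if_pos]
          rw [uc_getD_rest prev seen m hseen, uc_erase_rest,
            uc_modify_mid done rest r s _ hd hr]
        rw [hA, hseen, if_neg (by simp), if_pos hp]
        exact ih done rest _ _ hd hr
      · rw [Bool.not_eq_true] at hp
        have hc : (ucRest prev seen).contains m = false := by
          rw [uc_contains_rest, hp]; rfl
        have hA : ucAStep r (PySem.Dict.mk (done ++ (r, s) :: rest), ucRest prev seen) m
            = (PySem.Dict.mk (done ++ (r, s) :: rest), ucRest prev (PySem.Set.add seen m)) := by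
          simp only [ucAStep, hc]
          rw [uc_rest_add_of_absent prev seen m hp]
          simp
        rw [hA, hseen, if_neg (by simp), hp, if_neg (by simp)]
        exact ih done rest _ _ hd hr

theorem uc_outer (prev : List (String × List String)) :
    ∀ (rest done : List (String × List String)) (seen : PySem.Set String),
      ((done ++ rest).map Prod.fst).Nodup → (∀ pr ∈ rest, pr.2.Nodup) →
      rest.foldl (fun st pr => pr.2.foldl (ucAStep pr.1) st)
          (PySem.Dict.mk (done ++ rest), ucRest prev seen)
        = (PySem.Dict.mk (done ++ (ucProcess (PySem.Dict.mk prev) rest seen).1),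
           ucRest prev (ucProcess (PySem.Dict.mk prev) rest seen).2) := by
  intro rest
  induction rest with
  | nil => intro done seen _ _; simp [ucProcess]
  | cons pr rest ih =>
    intro done seen hnd hvals
    have hkeys : ((done ++ pr :: rest).map Prod.fst).Nodup := hnd
    rw [List.map_append, List.map_cons, List.nodup_append] at hkeys
    have hd : pr.1 ∉ done.map Prod.fst := fun hm => hkeys.2.2 pr.1 hm pr.1 (by simp) rfl
    have hr : pr.1 ∉ rest.map Prod.fst := (List.nodup_cons.mp hkeys.2.1).1
    have hms : pr.2.Nodup := hvals pr (by simp)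
    simp only [List.foldl_cons]
    have hcast : (done ++ pr :: rest) = done ++ (pr.1, pr.2) :: rest := by simp
    rw [hcast, uc_inner prev pr.1 pr.2 done rest pr.2 seen hd hr]
    have hres : ∀ q : PySem.Set String × PySem.Set String,
        (pr.2.foldl (fun acc name =>
            if acc.2.contains name then acc
            else if (PySem.Dict.mk prev).contains name then
              (PySem.Set.update acc.1 ((PySem.Dict.mk prev).getD name []),
               PySem.Set.add acc.2 name)
            else (acc.1, PySem.Set.add acc.2 name)) (pr.2, seen))
          = ucClusterMerge (PySem.Dict.mk prev) pr.2 seen := by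
      intro _
      unfold ucClusterMerge
      rw [uc_ofList_nodup pr.2 hms]
    rw [hres (PySem.Set.empty, PySem.Set.empty)]
    have hassoc : done ++ (pr.1, (ucClusterMerge (PySem.Dict.mk prev) pr.2 seen).1) :: rest
        = (done ++ [(pr.1, (ucClusterMerge (PySem.Dict.mk prev) pr.2 seen).1)]) ++ rest := by
      simp
    rw [hassoc, ih (done ++ [(pr.1, (ucClusterMerge (PySem.Dict.mk prev) pr.2 seen).1)])
          (ucClusterMerge (PySem.Dict.mk prev) pr.2 seen).2
          (by simpa using hnd) (fun q hq => hvals q (List.mem_cons_of_mem _ hq))]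
    simp [ucProcess]

theorem uc_built (p : PySem.Dict String (List String)) :
    ∀ (rest : List (String × List String)) (d : PySem.Dict String (List String))
      (seen : PySem.Set String),
      (∀ pr ∈ rest, d.contains pr.1 = false) → (rest.map Prod.fst).Nodup →
      rest.foldl (fun (acc : PySem.Dict String (List String) × PySem.Set String) pr =>
          let res := ucClusterMerge p pr.2 acc.2
          (acc.1.insert pr.1 res.1, res.2)) (d, seen)
        = (PySem.Dict.mk (d.items ++ (ucProcess p rest seen).1),
           (ucProcess p rest seen).2) := by
  intro rest
  induction rest with
  | nil => intro d seen _ _; simp [ucProcess]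
  | cons pr rest ih =>
    intro d seen hfresh hnd
    simp only [List.foldl_cons]
    have hins : d.insert pr.1 (ucClusterMerge p pr.2 seen).1
        = PySem.Dict.mk (d.items ++ [(pr.1, (ucClusterMerge p pr.2 seen).1)]) := by
      have := PySem.Dict.items_insert_of_not_contains d
        (ucClusterMerge p pr.2 seen).1 (hfresh pr (by simp))
      exact PySem.Dict.ext this
    rw [hins]
    rw [ih (PySem.Dict.mk (d.items ++ [(pr.1, (ucClusterMerge p pr.2 seen).1)]))
        (ucClusterMerge p pr.2 seen).2
        (by
          intro q hq
          have hne : q.1 ≠ pr.1 := by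
            intro he
            exact (List.nodup_cons.mp hnd).1 (he ▸ List.mem_map_of_mem hq)
          have hdq := hfresh q (List.mem_cons_of_mem _ hq)
          simp only [PySem.Dict.contains, PySem.Dict.items, List.any_append] at *
          simp [hdq]
          exact Ne.symm hne)
        ((List.nodup_cons.mp hnd).2)]
    simp [ucProcess]

theorem uc_merge_empty (r : String) :
    ∀ (ms : List String) (c : PySem.Dict String (List String)),
      ms.foldl (ucAStep r) (c, PySem.Dict.mk []) = (c, PySem.Dict.mk []) := by
  intro ms
  induction ms with
  | nil => intro c; rfl
  | cons m ms ih =>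
    intro c
    have h1 : ucAStep r (c, PySem.Dict.mk []) m = (c, PySem.Dict.mk []) := by
      simp [ucAStep, PySem.Dict.contains]
    simp only [List.foldl_cons, h1, ih]

theorem uc_phase1_empty :
    ∀ (ks : List String) (c : PySem.Dict String (List String)),
      ks.foldl (fun st r => (st.1.getD r []).foldl (ucAStep r) st)
          (c, (PySem.Dict.mk [] : PySem.Dict String (List String)))
        = (c, PySem.Dict.mk []) := by
  intro ks
  induction ks with
  | nil => intro c; rfl
  | cons k ks ih =>
    intro c
    simp only [List.foldl_cons]
    rw [uc_merge_empty]
    exact ih c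

theorem uc_getD_foldl_aStep_of_ne (r q : String) (hne : q ≠ r) :
    ∀ (ms : List String) (st : PySem.Dict String (List String) × PySem.Dict String (List String)),
      ((ms.foldl (ucAStep r) st).1).getD q [] = st.1.getD q [] := by
  intro ms
  induction ms with
  | nil => intro st; rfl
  | cons m ms ih =>
    intro st
    simp only [List.foldl_cons, ih]
    by_cases h : st.2.contains m = true
    · simp [ucAStep, h, PySem.Dict.modify, PySem.Dict.getD_insert_of_ne _ _ _ hne]
    · simp [ucAStep, h]

theorem uc_phase1_snapshot :
    ∀ (todo : List (String × List String))
      (st : PySem.Dict String (List String) × PySem.Dict String (List String)),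
      (todo.map Prod.fst).Nodup → (∀ pr ∈ todo, st.1.getD pr.1 [] = pr.2) →
      (todo.map Prod.fst).foldl (fun st r => (st.1.getD r []).foldl (ucAStep r) st) st
        = todo.foldl (fun st pr => pr.2.foldl (ucAStep pr.1) st) st := by
  intro todo
  induction todo with
  | nil => intro st _ _; rfl
  | cons pr todo ih =>
    intro st hnd hget
    simp only [List.map_cons, List.foldl_cons]
    rw [hget pr (by simp)]
    apply ih
    · exact (List.nodup_cons.mp hnd).2
    · intro q hq
      have hqne : q.1 ≠ pr.1 := by
        intro h
        exact (List.nodup_cons.mp hnd).1 (h ▸ List.mem_map_of_mem hq)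
      rw [uc_getD_foldl_aStep_of_ne pr.1 q.1 hqne]
      exact hget q (List.mem_cons_of_mem _ hq)

theorem uc_rest_empty_seen (prev : List (String × List String)) :
    ucRest prev PySem.Set.empty = PySem.Dict.mk prev := by
  simp only [ucRest]
  congr 1
  apply List.filter_eq_self.mpr
  intro p _
  rfl

theorem uc_phase2 (prev : List (String × List String)) (seen : PySem.Set String)
    (hnd : (prev.map Prod.fst).Nodup) (c : PySem.Dict String (List String)) :
    (ucRest prev seen).keys.foldl (fun c r =>
        (if c.contains r then c else c.insert r PySem.Set.empty).modify r []
          (fun s => PySem.Set.update s ((ucRest prev seen).getD r []))) c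
      = prev.foldl (fun m pr =>
          if seen.contains pr.1 then m
          else if m.contains pr.1 then m.modify pr.1 [] (fun s => PySem.Set.update s pr.2)
          else m.insert pr.1 (PySem.Set.ofList pr.2)) c := by
  have hnd' : ((ucRest prev seen).items.map Prod.fst).Nodup := by
    simp only [ucRest, PySem.Dict.items]
    exact List.Nodup.sublist (List.Sublist.map Prod.fst List.filter_sublist) hnd
  have hkeys : (ucRest prev seen).keys = (ucRest prev seen).items.map Prod.fst := rfl
  rw [hkeys, List.foldl_map]
  have hstep : ∀ (m : PySem.Dict String (List String)) (pr : String × List String),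
      pr ∈ (ucRest prev seen).items →
      (if m.contains pr.1 then m else m.insert pr.1 PySem.Set.empty).modify pr.1 []
          (fun s => PySem.Set.update s ((ucRest prev seen).getD pr.1 []))
        = (if m.contains pr.1 then m.modify pr.1 [] (fun s => PySem.Set.update s pr.2)
           else m.insert pr.1 (PySem.Set.ofList pr.2)) := by
    intro m pr hpr
    have hget : (ucRest prev seen).getD pr.1 [] = pr.2 :=
      PySem.Dict.getD_of_mem_items _ hpr hnd' []
    rw [hget]
    by_cases hc : m.contains pr.1 = true
    · rw [if_pos hc, if_pos hc]
    · rw [if_neg hc, if_neg hc]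
      rw [PySem.Dict.modify, PySem.Dict.getD_insert_self, PySem.Dict.insert_insert_self]
      rfl
  rw [PySem.List.foldl_congr_mem _ _ _ _ hstep]
  have hrest : (ucRest prev seen).items = prev.filter (fun pr => !seen.contains pr.1) := rfl
  have hrw : List.foldl (fun (m : PySem.Dict String (List String)) pr =>
      if m.contains pr.1 then m.modify pr.1 [] (fun s => PySem.Set.update s pr.2)
      else m.insert pr.1 (PySem.Set.ofList pr.2)) c
        (prev.filter (fun pr => !seen.contains pr.1))
      = List.foldl (fun (m : PySem.Dict String (List String)) pr =>
          if !seen.contains pr.1 then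
            (if m.contains pr.1 then m.modify pr.1 [] (fun s => PySem.Set.update s pr.2)
             else m.insert pr.1 (PySem.Set.ofList pr.2))
          else m) c prev := List.foldl_filter
  rw [hrest, hrw]
  apply PySem.List.foldl_congr_mem
  intro m pr _
  by_cases hs : seen.contains pr.1 = true
  · rw [hs]; simp
  · rw [Bool.not_eq_true] at hs; rw [hs]; simp

theorem uc_main (curr prev : List (String × List String))
    (hpre : Pre_update_clusters curr prev) :
    ((((PySem.Dict.mk curr : PySem.Dict String (List String)).keys.foldl
          (fun st r => (st.1.getD r []).foldl (ucAStep r) st)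
          (PySem.Dict.mk curr, PySem.Dict.mk prev)).2.keys.foldl
        (fun c r =>
          (if c.contains r then c else c.insert r PySem.Set.empty).modify r []
            (fun s => PySem.Set.update s
              (((PySem.Dict.mk curr : PySem.Dict String (List String)).keys.foldl
                  (fun st r => (st.1.getD r []).foldl (ucAStep r) st)
                  (PySem.Dict.mk curr, PySem.Dict.mk prev)).2.getD r [])))
        ((PySem.Dict.mk curr : PySem.Dict String (List String)).keys.foldl
            (fun st r => (st.1.getD r []).foldl (ucAStep r) st)
            (PySem.Dict.mk curr, PySem.Dict.mk prev)).1).items)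
      = update_clusters_alt curr prev := by
  obtain ⟨hc, hp, hv⟩ := hpre
  have h1 : (PySem.Dict.mk curr : PySem.Dict String (List String)).keys.foldl
        (fun st r => (st.1.getD r []).foldl (ucAStep r) st)
        (PySem.Dict.mk curr, PySem.Dict.mk prev)
      = (PySem.Dict.mk ([] ++ (ucProcess (PySem.Dict.mk prev) curr PySem.Set.empty).1),
         ucRest prev (ucProcess (PySem.Dict.mk prev) curr PySem.Set.empty).2) := by
    have hkeys : (PySem.Dict.mk curr : PySem.Dict String (List String)).keys
        = curr.map Prod.fst := rfl
    rw [hkeys]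
    rw [uc_phase1_snapshot curr (PySem.Dict.mk curr, PySem.Dict.mk prev) hc
      (fun pr hpr => PySem.Dict.getD_of_mem_items _ hpr hc [])]
    have := uc_outer prev curr [] PySem.Set.empty (by simpa using hc) hv
    rw [uc_rest_empty_seen] at this
    simpa using this
  rw [h1]
  rw [uc_phase2 prev (ucProcess (PySem.Dict.mk prev) curr PySem.Set.empty).2 hp]
  show _ = update_clusters_alt curr prev
  unfold update_clusters_alt
  dsimp only
  rw [uc_built (PySem.Dict.mk prev) curr PySem.Dict.empty PySem.Set.empty
    (fun _ _ => rfl) hc]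
  rfl

-- ===== VERDICT (by name: the statement is the Claim_ definition above) =====
theorem update_clusters_spec : Claim_equal_update_clusters := by
  intro curr prev _hdom hpre
  unfold Spec_update_clusters
  cases prev with
  | nil =>
    have hA : update_clusters curr [] = curr := rfl
    rw [hA, ← uc_main curr [] hpre, uc_phase1_empty]
    rfl
  | cons h t =>
    unfold update_clusters
    dsimp only
    rw [if_neg (by simp)]
    exact uc_main curr (h :: t) hpre
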